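-- pv_equiv track=rewrite | github.com/EndstoneMC/endweave | tools/parse.py | _lowest_numeric
-- ===== SOURCE A (Python) =====
-- def _lowest_numeric(ids: set[str]) -> str | None:
--     """Pick the ID with the lowest numeric value from a set of node IDs."""
--     numeric = []
--     for nid in ids:
--         try:
--             numeric.append((int(nid), nid))
--         except ValueError:
--             pass
--     if numeric:
--         numeric.sort()
--         return numeric[0][1]
--     return None
-- ===== SOURCE B (Python) =====
-- def _lowest_numeric(ids):
--     """Pick the ID with the lowest numeric value from a set of node IDs."""
--     best = None
--     for nid in ids:
--         try:
--             v = int(nid)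
--         except ValueError:
--             continue
--         if best is None or (v, nid) < best:
--             best = (v, nid)
--     return best[1] if best is not None else None
-- ===== Notes on version B (the rewrite author's own statement) =====
-- stated objective: simpler
-- what changed: Replaces build-list-then-sort with a single pass that keeps a running minimum (value, id) pair, so no intermediate list and no sort.
import Mathlib
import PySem

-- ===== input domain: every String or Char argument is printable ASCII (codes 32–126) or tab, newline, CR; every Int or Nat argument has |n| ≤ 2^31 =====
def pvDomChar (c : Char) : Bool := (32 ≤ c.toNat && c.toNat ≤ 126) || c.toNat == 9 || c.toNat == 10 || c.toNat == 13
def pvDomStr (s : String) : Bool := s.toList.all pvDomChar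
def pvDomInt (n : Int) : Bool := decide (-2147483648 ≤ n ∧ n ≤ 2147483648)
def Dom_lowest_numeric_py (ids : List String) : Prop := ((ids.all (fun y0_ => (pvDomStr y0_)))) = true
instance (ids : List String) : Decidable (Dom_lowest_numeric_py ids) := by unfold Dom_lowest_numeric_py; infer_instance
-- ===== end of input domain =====

-- B replaces build-list-then-sort by a single pass keeping the running minimum (value, id) pair (objective: simpler).


-- ===== PORT A =====
def lowest_numeric_py (ids : List String) : Option String :=
  -- numeric = []; for nid in ids: try numeric.append((int(nid), nid)) except ValueError: pass
  let numeric : List (Int × String) :=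
    ids.foldl (fun acc nid =>
      match PySem.Int.ofStr? nid with
      | some v => acc ++ [(v, nid)]
      | none => acc) []
  -- if numeric: numeric.sort(); return numeric[0][1]
  if numeric.isEmpty then none
  else ((PySem.List.sorted2 numeric (fun p => p.1) (fun p => p.2)).head?).map (fun p => p.2)

-- ===== PORT B =====
-- Python tuple comparison (v, nid) < (bv, bnid)
def pvPairLt (p q : Int × String) : Bool :=
  decide (p.1 < q.1) || (decide (p.1 = q.1) && decide (p.2 < q.2))

def lowest_numeric_py_alt (ids : List String) : Option String :=
  let best : Option (Int × String) :=
    ids.foldl (fun best nid =>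
      match PySem.Int.ofStr? nid with
      | none => best
      | some v =>
        match best with
        | none => some (v, nid)
        | some b => if pvPairLt (v, nid) b then some (v, nid) else some b) none
  best.map (fun p => p.2)

-- ===== PRECONDITION & SPEC =====
def Spec_lowest_numeric_py (ids : List String) (out : Option String) : Prop := out = lowest_numeric_py_alt ids
instance (ids : List String) (out : Option String) : Decidable (Spec_lowest_numeric_py ids out) := by unfold Spec_lowest_numeric_py; infer_instance

-- ===== CLAIM (what is proved, stated in full; the proofs are below) =====
def Claim_equal_lowest_numeric_py : Prop := ∀ (ids : List String), Dom_lowest_numeric_py ids → Spec_lowest_numeric_py ids (lowest_numeric_py ids)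

-- ===== LEMMAS AND PROOFS =====

-- the list of parsed (value, id) pairs, in order
def pvPairs (ids : List String) : List (Int × String) :=
  ids.filterMap (fun nid => (PySem.Int.ofStr? nid).map (fun v => (v, nid)))

-- the comparison sorted2 uses, specialised to fst/snd keys
def pvBefore (a b : Int × String) : Bool :=
  decide (a.1 < b.1) || (!decide (b.1 < a.1) && decide (a.2 < b.2))

lemma pvPairLt_eq_before (p q : Int × String) : pvPairLt p q = pvBefore p q := by
  simp only [pvPairLt, pvBefore]
  by_cases h1 : p.1 < q.1 <;> by_cases h2 : q.1 < p.1 <;>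
    simp [show p.1 = q.1 ↔ (p.1 ≤ q.1 ∧ q.1 ≤ p.1) from le_antisymm_iff, *]; omega

-- A's accumulation loop builds acc ++ pvPairs ids
lemma A_numeric_eq (ids : List String) (acc : List (Int × String)) :
    ids.foldl (fun acc nid =>
      match PySem.Int.ofStr? nid with
      | some v => acc ++ [(v, nid)]
      | none => acc) acc = acc ++ pvPairs ids := by
  induction ids generalizing acc with
  | nil => simp [pvPairs]
  | cons x xs ih =>
    simp only [List.foldl_cons, pvPairs, List.filterMap_cons]
    cases h : PySem.Int.ofStr? x <;> simp [ih, pvPairs]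

-- the step function on the running best
def pvStep (best : Option (Int × String)) (p : Int × String) : Option (Int × String) :=
  match best with
  | none => some p
  | some b => if pvBefore p b then some p else some b

-- B's loop over ids equals the pvStep fold over the parsed pairs
lemma B_fold_eq (ids : List String) (best : Option (Int × String)) :
    ids.foldl (fun best nid =>
      match PySem.Int.ofStr? nid with
      | none => best
      | some v =>
        match best with
        | none => some (v, nid)
        | some b => if pvPairLt (v, nid) b then some (v, nid) else some b) best
    = (pvPairs ids).foldl pvStep best := by
  induction ids generalizing best with
  | nil => simp [pvPairs]
  | cons x xs ih =>
    simp only [List.foldl_cons, pvPairs, List.filterMap_cons]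
    cases h : PySem.Int.ofStr? x with
    | none => simp [ih, pvPairs]
    | some v =>
      simp only [Option.map_some, List.foldl_cons, ih, pvPairs]
      congr 1
      cases best with
      | none => rfl
      | some b => simp [pvStep, pvPairLt_eq_before]

lemma head?_insertBy (x : Int × String) (acc : List (Int × String)) :
    (PySem.List.insertBy pvBefore x acc).head? = some (match acc.head? with
      | none => x
      | some y => if pvBefore x y then x else y) := by
  cases acc with
  | nil => simp [PySem.List.insertBy]
  | cons y ys =>
    simp only [PySem.List.insertBy, List.head?_cons]
    split <;> simp_all

-- head of the insertion-sort fold is the pvStep fold of the heads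
lemma head?_foldl_insertBy (L : List (Int × String)) (acc : List (Int × String)) :
    (L.foldl (fun acc x => PySem.List.insertBy pvBefore x acc) acc).head?
      = L.foldl pvStep acc.head? := by
  induction L generalizing acc with
  | nil => rfl
  | cons x xs ih =>
    simp only [List.foldl_cons, ih, head?_insertBy]
    congr 1
    cases acc with
    | nil => rfl
    | cons y ys => simp only [List.head?_cons, pvStep]; split <;> rfl

lemma sorted2_head (L : List (Int × String)) :
    (PySem.List.sorted2 L (fun p => p.1) (fun p => p.2)).head? = L.foldl pvStep none := by
  have : PySem.List.sorted2 L (fun p => p.1) (fun p => p.2)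
      = L.foldl (fun acc x => PySem.List.insertBy pvBefore x acc) [] := by
    simp only [PySem.List.sorted2]; rfl
  rw [this, head?_foldl_insertBy]; rfl

-- ===== VERDICT (by name: the statement is the Claim_ definition above) =====
theorem lowest_numeric_py_spec : Claim_equal_lowest_numeric_py := by
  intro ids _
  unfold Spec_lowest_numeric_py lowest_numeric_py lowest_numeric_py_alt
  simp only [A_numeric_eq, B_fold_eq, List.nil_append]
  by_cases h : pvPairs ids = []
  · simp [h]
  · rw [if_neg (by simpa using h), sorted2_head]
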